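-- pv_equiv track=rewrite | github.com/tedcarnahan/directory_builder.py | convert_csv.py | determine_primary_adult
-- ===== SOURCE A (Python) =====
-- def get_age(age_str):
--     if not age_str:
--         return 18
--     try:
--         return int(age_str)
--     except ValueError:
--         return 18
--
-- def determine_primary_adult(family_members):
--     head = next((m for m in family_members if m['Family Role'] == 'Head of Household'), None)
--     if head:
--         return head
--
--     adults = [m for m in family_members if m['Family Role'] in ['Adult', 'Spouse']]
--     if not adults:
--         return None
--
--     # Sort adults by age (oldest first) and then by gender (male first)
--     adults.sort(key=lambda m: (get_age(m['Age']), m['Gender'] == 'Female'), reverse=True)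
--     return adults[0]
-- ===== SOURCE B (Python) =====
-- def get_age(age_str):
--     if not age_str:
--         return 18
--     try:
--         return int(age_str)
--     except ValueError:
--         return 18
--
-- def determine_primary_adult(family_members):
--     # Phase 1: first Head of Household wins, short-circuiting like A's next().
--     for m in family_members:
--         if m['Family Role'] == 'Head of Household':
--             return m
--     # Phase 2: single O(n) selection pass instead of building a list and sorting it:
--     # keep the first member whose key is strictly greater than the best so far, which
--     # reproduces the stable reverse-sort's earliest-among-ties choice.
--     best = None
--     best_key = None
--     for m in family_members:
--         if m['Family Role'] in ('Adult', 'Spouse'):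
--             key = (get_age(m['Age']), m['Gender'] == 'Female')
--             if best is None or key > best_key:
--                 best, best_key = m, key
--     return best
-- ===== Notes on version B (the rewrite author's own statement) =====
-- stated objective: simpler
-- what changed: B keeps A's head-of-household short-circuit but replaces A's filter-then-stable-reverse-sort-then-take-first with a single selection pass that keeps the first member whose (age, gender==Female) key is strictly greater than the best so far, reproducing the stable sort's earliest-among-ties choice without building or sorting a list.
import Mathlib
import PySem

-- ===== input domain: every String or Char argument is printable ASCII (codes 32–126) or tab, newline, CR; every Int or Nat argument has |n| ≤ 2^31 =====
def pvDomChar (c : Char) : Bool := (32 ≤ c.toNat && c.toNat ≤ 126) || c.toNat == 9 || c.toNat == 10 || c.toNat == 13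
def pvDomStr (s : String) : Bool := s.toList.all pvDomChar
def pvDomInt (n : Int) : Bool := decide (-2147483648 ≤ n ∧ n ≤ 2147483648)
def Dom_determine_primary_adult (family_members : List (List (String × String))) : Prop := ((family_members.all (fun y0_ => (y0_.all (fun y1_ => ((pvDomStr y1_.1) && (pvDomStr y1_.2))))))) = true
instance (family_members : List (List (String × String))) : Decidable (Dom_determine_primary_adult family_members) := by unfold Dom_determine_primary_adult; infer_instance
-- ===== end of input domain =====

-- B replaces A's "filter adults, stable reverse-sort by (age, gender), take [0]" with a
-- single selection pass keeping the first strictly greater (age, gender) key: simpler, one pass, no sort.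

-- ===== PORT A =====

-- m[k] on the Python dict: first-match lookup; total with default "" — Pre_ guarantees the key is present wherever A reads one.
def pvGet (m : List (String × String)) (k : String) : String := (m.lookup k).getD ""

-- get_age(age_str): '' is falsy → 18; int(s) → PySem.Int.ofStr?; ValueError → 18
def pvGetAge (s : String) : Int :=
  if s = "" then 18
  else match PySem.Int.ofStr? s with
       | some n => n
       | none => 18

-- m['Family Role'] in ['Adult', 'Spouse']
def pvIsAdult (m : List (String × String)) : Bool :=
  pvGet m "Family Role" == "Adult" || pvGet m "Family Role" == "Spouse"

-- the Python sort key (get_age(m['Age']), m['Gender'] == 'Female'); the bool compares as int 0/1 in Python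
def pvKey1 (m : List (String × String)) : Int := pvGetAge (pvGet m "Age")
def pvKey2 (m : List (String × String)) : Int := if pvGet m "Gender" == "Female" then 1 else 0

def determine_primary_adult (family_members : List (List (String × String))) : Option (List (String × String)) :=
  match family_members.find? (fun m => pvGet m "Family Role" == "Head of Household") with
  | some head => some head
  | none =>
    let adults := family_members.filter pvIsAdult
    if adults = [] then none
    else (PySem.List.sorted2 adults pvKey1 pvKey2 true)[0]?

-- ===== PORT B =====

-- body of B's selection loop: keep the first member whose (key1, key2) is strictly
-- greater (Python tuple '>', ported by hand: lexicographic on the two Int components)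
def pvSelStep (acc : Option (List (String × String) × Int × Int)) (m : List (String × String)) :
    Option (List (String × String) × Int × Int) :=
  match acc with
  | none => some (m, pvKey1 m, pvKey2 m)
  | some (b, b1, b2) =>
    if b1 < pvKey1 m ∨ (b1 = pvKey1 m ∧ b2 < pvKey2 m) then some (m, pvKey1 m, pvKey2 m)
    else some (b, b1, b2)

def determine_primary_adult_alt (family_members : List (List (String × String))) : Option (List (String × String)) :=
  match family_members.find? (fun m => pvGet m "Family Role" == "Head of Household") with
  | some head => some head
  | none =>
    (family_members.foldl (fun acc m => if pvIsAdult m then pvSelStep acc m else acc) none).map (fun p => p.1)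

-- ===== PRECONDITION & SPEC =====
-- Pre_ excludes exactly the inputs where Python A raises KeyError: a member reached before the
-- first Head of Household lacking 'Family Role', or (when there is no head) an Adult/Spouse
-- member lacking 'Age' or 'Gender'.
def Pre_determine_primary_adult (family_members : List (List (String × String))) : Prop :=
  (∀ m ∈ family_members.takeWhile (fun m => !(pvGet m "Family Role" == "Head of Household")),
      (m.lookup "Family Role").isSome = true) ∧
  ((∀ m ∈ family_members, ¬ (pvGet m "Family Role" = "Head of Household")) →
      ∀ m ∈ family_members, pvIsAdult m = true →
        (m.lookup "Age").isSome = true ∧ (m.lookup "Gender").isSome = true)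
instance (family_members : List (List (String × String))) : Decidable (Pre_determine_primary_adult family_members) := by unfold Pre_determine_primary_adult; infer_instance

def pvWitness_determine_primary_adult : (List (List (String × String))) :=
  [[("Family Role", "Adult"), ("Age", "40"), ("Gender", "Male")],
   [("Family Role", "Spouse"), ("Age", "40"), ("Gender", "Female")]]

def Spec_determine_primary_adult (family_members : List (List (String × String))) (out : Option (List (String × String))) : Prop := out = determine_primary_adult_alt family_members
instance (family_members : List (List (String × String))) (out : Option (List (String × String))) : Decidable (Spec_determine_primary_adult family_members out) := by unfold Spec_determine_primary_adult; infer_instance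

-- ===== CLAIM (what is proved, stated in full; the proofs are below) =====
def Claim_equal_determine_primary_adult : Prop := ∀ (family_members : List (List (String × String))), Dom_determine_primary_adult family_members → Pre_determine_primary_adult family_members → Spec_determine_primary_adult family_members (determine_primary_adult family_members)

-- ===== LEMMAS AND PROOFS =====

-- proof-only: the plain "first maximum" step on members, without the cached keys
def pvMaxStep (o : Option (List (String × String))) (m : List (String × String)) :
    Option (List (String × String)) :=
  match o with
  | none => some m
  | some b =>
    if pvKey1 b < pvKey1 m ∨ (pvKey1 b = pvKey1 m ∧ pvKey2 b < pvKey2 m) then some m else some b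

-- B's accumulator caches the keys of the best member; projecting it away gives pvMaxStep
theorem pvSel_eq_max (xs : List (List (String × String))) (o : Option (List (String × String))) :
    ((xs.foldl pvSelStep (o.map (fun b => (b, pvKey1 b, pvKey2 b)))).map (fun p => p.1))
      = xs.foldl pvMaxStep o := by
  induction xs generalizing o with
  | nil => cases o <;> rfl
  | cons x t ih =>
    have h : pvSelStep (o.map (fun b => (b, pvKey1 b, pvKey2 b))) x
        = (pvMaxStep o x).map (fun b => (b, pvKey1 b, pvKey2 b)) := by
      cases o with
      | none => rfl
      | some b => simp only [Option.map_some, pvSelStep, pvMaxStep]; split <;> rfl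
    simpa [h] using ih (pvMaxStep o x)

-- the head of an insertion-sort fold is the running "first extremal" fold
theorem pvHead_foldl_insertBy {α : Type} (before : α → α → Bool)
    (xs : List α) (acc : List α) :
    (xs.foldl (fun a x => PySem.List.insertBy before x a) acc).head?
      = xs.foldl (fun (o : Option α) x =>
          match o with
          | none => some x
          | some m => if before x m then some x else some m) acc.head? := by
  induction xs generalizing acc with
  | nil => rfl
  | cons x t ih =>
    have h : (PySem.List.insertBy before x acc).head?
        = (match acc.head? with
           | none => some x
           | some m => if before x m then some x else some m) := by
      cases acc with
      | nil => rfl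
      | cons y ys => simp only [PySem.List.insertBy, List.head?_cons]; split <;> rfl
    simp only [List.foldl_cons, ih (PySem.List.insertBy before x acc), h]

-- head of the stable reverse sort = first maximum fold
theorem pvSorted2_head (xs : List (List (String × String))) :
    (PySem.List.sorted2 xs pvKey1 pvKey2 true)[0]? = xs.foldl pvMaxStep none := by
  have h := pvHead_foldl_insertBy
    (fun a b => decide (pvKey1 b < pvKey1 a) || !decide (pvKey1 a < pvKey1 b) && decide (pvKey2 b < pvKey2 a)) xs []
  simp only [PySem.List.sorted2, if_true]
  rw [← List.head?_eq_getElem?]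
  rw [h]
  simp only [List.head?_nil]
  -- the two step functions agree: Python's tuple-'<' on (Int, Int) is the lexicographic order
  refine List.foldl_ext _ pvMaxStep none (fun o x _ => ?_)
  cases o with
  | none => rfl
  | some b =>
    simp only [pvMaxStep]
    by_cases h1 : pvKey1 b < pvKey1 x
    · simp [h1]
    · by_cases h2 : pvKey1 x < pvKey1 b
      · have hne : ¬ pvKey1 b = pvKey1 x := by omega
        simp [h1, h2, hne]
      · simp [(by omega : pvKey1 b = pvKey1 x)]

-- ===== VERDICT (by name: the statement is the Claim_ definition above) =====
theorem determine_primary_adult_spec : Claim_equal_determine_primary_adult := by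
  intro fm _dom _pre
  unfold Spec_determine_primary_adult determine_primary_adult determine_primary_adult_alt
  cases hf : fm.find? (fun m => pvGet m "Family Role" == "Head of Household") with
  | some h => rfl
  | none =>
    simp only []
    rw [← List.foldl_filter]
    rw [show (Option.none : Option (List (String × String) × Int × Int))
          = Option.map (fun b => (b, pvKey1 b, pvKey2 b)) none from rfl]
    rw [pvSel_eq_max]
    by_cases he : fm.filter pvIsAdult = []
    · simp [he]
    · simp only [if_neg he]
      exact pvSorted2_head (fm.filter pvIsAdult)
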